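-- pv_equiv track=rewrite | github.com/Sebs2807/ejercicios-python-avanzados | Journey to the moon.py | journeyToMoon
-- ===== SOURCE A (Python) =====
-- def journeyToMoon(n, astronaut):
--     graph = [[] for i in range(n)]
--     for x,y in astronaut:
--         graph[x].append(y)
--         graph[y].append(x)
--     visitados = [False] * n
--     parejas = n * (n - 1) // 2
--
--     def dfs(u,graph,visitados):
--         visitados[u] = True
--         vertices = 1
--         for v in graph[u]:
--             if visitados[v] == False:
--                 vertices += dfs(v,graph,visitados)
--         return vertices
--     for v in range(n):
--         if visitados[v] == False:
--             personas = dfs(v,graph,visitados)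
--             parejas -= personas * (personas - 1) // 2
--     return parejas
-- ===== SOURCE B (Python) =====
-- def journeyToMoon(n, astronaut):
--     adj = {}
--     for x, y in astronaut:
--         adj.setdefault(x, []).append(y)
--         adj.setdefault(y, []).append(x)
--     seen = [False] * n
--     total = n * (n - 1) // 2
--     for s in range(n):
--         if seen[s]:
--             continue
--         seen[s] = True
--         size = 0
--         stack = [s]
--         while stack:
--             u = stack.pop()
--             size += 1
--             for v in adj.get(u, []):
--                 if not seen[v]:
--                     seen[v] = True
--                     stack.append(v)
--         total -= size * (size - 1) // 2
--     return total
-- ===== Notes on version B (the rewrite author's own statement) =====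
-- stated objective: idiomatic
-- what changed: Replaced the recursive DFS over a preallocated adjacency-list-of-lists with an explicit-stack iterative traversal over a dict adjacency built with setdefault, accumulating each component's size with a pop/push loop instead of call-stack recursion (no RecursionError on deep components).
-- outside the precondition, e.g. on journeyToMoon(3, [[-1, -3], [0, 1]]): A returns 0, B returns 2
import Mathlib
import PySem

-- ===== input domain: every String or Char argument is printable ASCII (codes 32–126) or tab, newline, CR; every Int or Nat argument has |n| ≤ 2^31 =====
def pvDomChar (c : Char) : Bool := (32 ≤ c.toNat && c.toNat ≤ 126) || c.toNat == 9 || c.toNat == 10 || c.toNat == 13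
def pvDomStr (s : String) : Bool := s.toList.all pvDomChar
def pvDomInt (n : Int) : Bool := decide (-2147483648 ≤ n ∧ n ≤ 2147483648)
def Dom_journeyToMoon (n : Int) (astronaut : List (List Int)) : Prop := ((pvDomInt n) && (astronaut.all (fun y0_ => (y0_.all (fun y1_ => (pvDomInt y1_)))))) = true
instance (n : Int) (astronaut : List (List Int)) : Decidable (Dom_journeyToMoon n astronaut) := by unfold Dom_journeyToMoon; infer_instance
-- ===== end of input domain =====

-- B replaces A's recursive DFS over a list-of-lists adjacency with an explicit-stack iterative
-- traversal over a dict adjacency (alternative algorithm, same O(n+m) cost, no call-stack recursion).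


-- ===== PORT A =====
-- Index helpers shared by both ports; exact for 0 ≤ i < length, which Pre_journeyToMoon guarantees
-- for every index either program ever uses.
def getV (v : List Bool) (i : Int) : Bool := v.getD i.toNat false
def setV (v : List Bool) (i : Int) : List Bool := v.set i.toNat true
def getRow (g : List (List Int)) (i : Int) : List Int := g.getD i.toNat []
def appRow (g : List (List Int)) (i : Int) (x : Int) : List (List Int) := g.set i.toNat (getRow g i ++ [x])

def graphA (n : Int) (astronaut : List (List Int)) : List (List Int) :=
  astronaut.foldl (fun g p =>
    match p with
    | [x, y] => appRow (appRow g x y) y x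
    | _ => g) (List.replicate n.toNat [])

-- recursive dfs; fuel only makes the recursion structural (never exhausted: each call starts with
-- fuel > number of unvisited entries)
def dfsA (g : List (List Int)) : Nat → Int → List Bool → Int × List Bool
  | 0, _, vis => (0, vis)
  | f + 1, u, vis =>
    (getRow g u).foldl
      (fun acc v =>
        if getV acc.2 v = false then
          let r := dfsA g f v acc.2
          (acc.1 + r.1, r.2)
        else acc)
      (1, setV vis u)

def journeyToMoon (n : Int) (astronaut : List (List Int)) : Int :=
  let g := graphA n astronaut
  ((PySem.List.pyRange 0 n 1).foldl
    (fun acc v =>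
      if getV acc.2 v = false then
        let d := dfsA g (acc.2.count false + 1) v acc.2
        (acc.1 - PySem.Int.floordiv (d.1 * (d.1 - 1)) 2, d.2)
      else acc)
    (PySem.Int.floordiv (n * (n - 1)) 2, List.replicate n.toNat false)).1

-- ===== PORT B =====
def adjB (astronaut : List (List Int)) : PySem.Dict Int (List Int) :=
  astronaut.foldl (fun d p =>
    match p with
    | [x, y] => (d.modify x [] (· ++ [y])).modify y [] (· ++ [x])
    | _ => d) PySem.Dict.empty

-- explicit-stack loop (stack.pop() pops the LAST element); fuel only makes the loop structural
def bfsB (adj : PySem.Dict Int (List Int)) : Nat → List Int → Int → List Bool → Int × List Bool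
  | 0, _, size, seen => (size, seen)
  | f + 1, stack, size, seen =>
    match stack.getLast? with
    | none => (size, seen)
    | some u =>
      let st := (adj.getD u []).foldl
        (fun (p : List Bool × List Int) v =>
          if getV p.1 v = false then (setV p.1 v, p.2 ++ [v]) else p)
        (seen, stack.dropLast)
      bfsB adj f st.2 (size + 1) st.1

def journeyToMoon_alt (n : Int) (astronaut : List (List Int)) : Int :=
  let adj := adjB astronaut
  ((PySem.List.pyRange 0 n 1).foldl
    (fun acc s =>
      if getV acc.2 s then acc
      else
        let r := bfsB adj (acc.2.count false + 1) [s] 0 (setV acc.2 s)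
        (acc.1 - PySem.Int.floordiv (r.1 * (r.1 - 1)) 2, r.2))
    (PySem.Int.floordiv (n * (n - 1)) 2, List.replicate n.toNat false)).1


-- ===== PRECONDITION & SPEC =====
-- Pre_ restricts to the problem's natural domain: every row is a pair of astronaut ids in [0, n).
-- It excludes malformed rows (A raises ValueError) and ids ≥ n or < -n (A raises IndexError), and
-- also negative ids, on which A returns a value only via Python's silent negative-index wraparound
-- (edge [v, w] read as [n + v, w]) while B keys its dict by the id itself.
def Pre_journeyToMoon (n : Int) (astronaut : List (List Int)) : Prop :=
  ∀ p ∈ astronaut, p.length = 2 ∧ ∀ v ∈ p, 0 ≤ v ∧ v < n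
instance (n : Int) (astronaut : List (List Int)) : Decidable (Pre_journeyToMoon n astronaut) := by
  unfold Pre_journeyToMoon; infer_instance
def pvWitness_journeyToMoon : Int × List (List Int) := (5, [[0, 1], [2, 3], [0, 4]])

def Spec_journeyToMoon (n : Int) (astronaut : List (List Int)) (out : Int) : Prop := out = journeyToMoon_alt n astronaut
instance (n : Int) (astronaut : List (List Int)) (out : Int) : Decidable (Spec_journeyToMoon n astronaut out) := by unfold Spec_journeyToMoon; infer_instance

-- ===== CLAIM (what is proved, stated in full; the proofs are below) =====
def Claim_equal_journeyToMoon : Prop := ∀ (n : Int) (astronaut : List (List Int)), Dom_journeyToMoon n astronaut → Pre_journeyToMoon n astronaut → Spec_journeyToMoon n astronaut (journeyToMoon n astronaut)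

-- ===== LEMMAS AND PROOFS =====
-- Abstract view used by the proofs: monotone Bool-arrays, edge relation, reachability.
def Mono (v w : List Bool) : Prop := ∀ j : Nat, v.getD j false = true → w.getD j false = true
def AdjP (l : List (List Int)) (a b : Int) : Prop := [a, b] ∈ l ∨ [b, a] ∈ l
def ReachN (nbr : Int → List Int) (vis : List Bool) : Int → Int → Prop :=
  Relation.ReflTransGen (fun a b => b ∈ nbr a ∧ getV vis b = false)

theorem length_setV (v : List Bool) (i : Int) : (setV v i).length = v.length := by simp [setV]

theorem getV_setV (v : List Bool) (i j : Int) (hi : i.toNat < v.length) :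
    getV (setV v i) j = if j.toNat = i.toNat then true else getV v j := by
  simp only [getV, setV, List.getD_eq_getElem?_getD, List.getElem?_set]
  split_ifs <;> first | rfl | omega

theorem mono_trans {u v w : List Bool} (h1 : Mono u v) (h2 : Mono v w) : Mono u w :=
  fun j h => h2 j (h1 j h)

theorem mono_setV (v : List Bool) (i : Int) : Mono v (setV v i) := by
  intro j h
  simp only [setV, List.getD_eq_getElem?_getD, List.getElem?_set] at *
  split_ifs with h1 <;> simp_all

theorem getV_false_mono {v w : List Bool} (hm : Mono v w) {b : Int} (h : getV w b = false) :
    getV v b = false := by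
  by_contra hc
  have h1 : getV v b = true := by cases h' : getV v b <;> simp_all
  have := hm b.toNat h1
  unfold getV at h; simp_all

theorem count_false_le_of_mono : ∀ (v w : List Bool), v.length = w.length → Mono v w →
    w.count false ≤ v.count false := by
  intro v
  induction v with
  | nil => intro w h _; cases w <;> simp_all
  | cons a t ih =>
    intro w hl hm
    cases w with
    | nil => simp_all
    | cons b t' =>
      have hhead : a = true → b = true := by have := hm 0; simpa using this
      have htail : Mono t t' := by
        intro j h; have := hm (j + 1); simpa using this h
      have h2 := ih t' (by simpa using hl) htail
      rw [List.count_cons, List.count_cons]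
      cases a
      · cases b <;> simp <;> omega
      · rw [hhead rfl]; simp; omega

theorem count_false_setV_nat : ∀ (v : List Bool) (k : Nat), k < v.length →
    v.getD k false = false → (v.set k true).count false + 1 = v.count false := by
  intro v
  induction v with
  | nil => simp
  | cons a t ih =>
    intro k hk hf
    cases k with
    | zero =>
      have : a = false := by simpa using hf
      simp [this]
    | succ k' =>
      have := ih k' (by simpa using hk) (by simpa using hf)
      simp only [List.set, List.count_cons]
      omega

theorem count_false_setV (v : List Bool) (i : Int) (hi : i.toNat < v.length)
    (hf : getV v i = false) : (setV v i).count false + 1 = v.count false :=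
  count_false_setV_nat v i.toNat hi hf

theorem list_eq_of_getD (v w : List Bool) (hl : v.length = w.length)
    (h : ∀ j : Nat, v.getD j false = w.getD j false) : v = w := by
  apply List.ext_getElem hl
  intro j h1 h2
  have := h j
  rwa [List.getD_eq_getElem?_getD, List.getD_eq_getElem?_getD,
    List.getElem?_eq_getElem h1, List.getElem?_eq_getElem h2] at this
theorem length_appRow (g : List (List Int)) (x v : Int) : (appRow g x v).length = g.length := by
  simp [appRow]

theorem getRow_appRow (g : List (List Int)) (x v a : Int) (hx0 : 0 ≤ x)
    (hxl : x.toNat < g.length) (ha : 0 ≤ a) :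
    getRow (appRow g x v) a = if a = x then getRow g x ++ [v] else getRow g a := by
  simp only [getRow, appRow, List.getD_eq_getElem?_getD, List.getElem?_set]
  split_ifs <;> first | rfl | omega

theorem getRow_shift (g : List (List Int)) (a : Int) :
    getRow g a = getRow g ((a.toNat : Int)) := by unfold getRow; rw [Int.toNat_natCast]

theorem mem_row_step (g : List (List Int)) (x y a b : Int) (hx0 : 0 ≤ x)
    (hxg : x.toNat < g.length) (hy0 : 0 ≤ y) (hyg : y.toNat < g.length) (ha : 0 ≤ a) :
    (b ∈ getRow (appRow (appRow g x y) y x) a ↔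
      b ∈ getRow g a ∨ (a = x ∧ b = y) ∨ (a = y ∧ b = x)) := by
  rw [getRow_appRow _ y x a hy0 (by rwa [length_appRow]) ha]
  by_cases hay : a = y
  · rw [if_pos hay, hay, getRow_appRow g x y y hx0 hxg hy0]
    by_cases hyx : y = x
    · rw [if_pos hyx]
      subst hay; subst hyx
      simp only [List.mem_append, List.mem_singleton]
      tauto
    · rw [if_neg hyx]
      subst hay
      simp only [List.mem_append, List.mem_singleton]
      tauto
  · rw [if_neg hay, getRow_appRow g x y a hx0 hxg ha]
    by_cases hax : a = x
    · rw [if_pos hax]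
      subst hax
      simp only [List.mem_append, List.mem_singleton]
      tauto
    · rw [if_neg hax]
      tauto

theorem adjP_cons (p : List Int) (t : List (List Int)) (a b : Int) :
    AdjP (p :: t) a b ↔ (p = [a, b] ∨ p = [b, a]) ∨ AdjP t a b := by
  simp only [AdjP, List.mem_cons]
  constructor <;> intro h <;> rcases h with (h | h) | h <;> tauto

theorem memA_aux (n : Int) : ∀ (l : List (List Int)) (g : List (List Int)),
    g.length = n.toNat →
    (∀ p ∈ l, p.length = 2 ∧ ∀ v ∈ p, 0 ≤ v ∧ v < n) →
    ∀ a b : Int, 0 ≤ a →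
    (b ∈ getRow (l.foldl (fun g p => match p with
        | [x, y] => appRow (appRow g x y) y x
        | _ => g) g) a ↔ b ∈ getRow g a ∨ AdjP l a b) := by
  intro l
  induction l with
  | nil => intro g _ _ a b _; simp [AdjP]
  | cons p t ih =>
    intro g hg hpre a b ha
    obtain ⟨hp2, hpb⟩ := hpre p (by simp)
    rcases p with _ | ⟨x, _ | ⟨y, _ | ⟨z, r⟩⟩⟩ <;> simp at hp2
    have hx := hpb x (by simp)
    have hy := hpb y (by simp)
    rw [List.foldl_cons]
    have hg1 : (appRow (appRow g x y) y x).length = n.toNat := by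
      rw [length_appRow, length_appRow]; exact hg
    rw [ih _ hg1 (fun q hq => hpre q (by simp [hq])) a b ha]
    rw [mem_row_step g x y a b hx.1 (by omega) hy.1 (by omega) ha]
    rw [adjP_cons]
    have hpair1 : ([x, y] = [a, b] ↔ a = x ∧ b = y) := by
      constructor
      · intro h; injection h with h1 h2; injection h2 with h2 _; exact ⟨h1.symm, h2.symm⟩
      · rintro ⟨h1, h2⟩; rw [h1, h2]
    have hpair2 : ([x, y] = [b, a] ↔ a = y ∧ b = x) := by
      constructor
      · intro h; injection h with h1 h2; injection h2 with h2 _; exact ⟨h2.symm, h1.symm⟩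
      · rintro ⟨h1, h2⟩; rw [h1, h2]
    rw [hpair1, hpair2]
    tauto

theorem memA (n : Int) (l : List (List Int))
    (hpre : ∀ p ∈ l, p.length = 2 ∧ ∀ v ∈ p, 0 ≤ v ∧ v < n) (a b : Int) (ha : 0 ≤ a) :
    b ∈ getRow (graphA n l) a ↔ AdjP l a b := by
  unfold graphA
  rw [memA_aux n l _ (by simp) hpre a b ha]
  have h0 : getRow (List.replicate n.toNat ([] : List Int)) a = [] := by
    simp only [getRow, List.getD_eq_getElem?_getD, List.getElem?_replicate]
    split_ifs <;> rfl
  rw [h0]; simp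

theorem adjP_range (n : Int) (l : List (List Int))
    (hpre : ∀ p ∈ l, p.length = 2 ∧ ∀ v ∈ p, 0 ≤ v ∧ v < n) {a b : Int} (h : AdjP l a b) :
    (0 ≤ a ∧ a < n) ∧ (0 ≤ b ∧ b < n) := by
  rcases h with h | h <;> obtain ⟨_, hb⟩ := hpre _ h
  · exact ⟨hb a (by simp), hb b (by simp)⟩
  · exact ⟨hb a (by simp), hb b (by simp)⟩

theorem hrangeA (n : Int) (l : List (List Int))
    (hpre : ∀ p ∈ l, p.length = 2 ∧ ∀ v ∈ p, 0 ≤ v ∧ v < n) :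
    ∀ a b : Int, b ∈ getRow (graphA n l) a → 0 ≤ b ∧ b.toNat < n.toNat := by
  intro a b h
  rw [getRow_shift] at h
  rw [memA n l hpre _ b (by positivity)] at h
  have := adjP_range n l hpre h
  omega
theorem memB_aux : ∀ (l : List (List Int)) (d : PySem.Dict Int (List Int)) (a b : Int),
    (b ∈ (l.foldl (fun d p => match p with
        | [x, y] => (d.modify x [] (· ++ [y])).modify y [] (· ++ [x])
        | _ => d) d).getD a [] ↔ b ∈ d.getD a [] ∨ AdjP l a b) := by
  intro l
  induction l with
  | nil => intro d a b; simp [AdjP]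
  | cons p t ih =>
    intro d a b
    rw [List.foldl_cons, adjP_cons]
    rcases p with _ | ⟨x, _ | ⟨y, _ | ⟨z, r⟩⟩⟩
    · rw [ih]
      have : ¬ (([] : List Int) = [a, b] ∨ ([] : List Int) = [b, a]) := by simp
      tauto
    · rw [ih]
      have : ¬ (([x] : List Int) = [a, b] ∨ ([x] : List Int) = [b, a]) := by simp
      tauto
    · rw [ih]
      have hstep : b ∈ (((d.modify x [] (· ++ [y])).modify y [] (· ++ [x])).getD a []) ↔
          b ∈ d.getD a [] ∨ (a = x ∧ b = y) ∨ (a = y ∧ b = x) := by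
        rw [PySem.Dict.getD_modify]
        split_ifs with hay
        · subst hay
          rw [PySem.Dict.getD_modify]
          split_ifs with hax
          · subst hax
            simp only [List.mem_append, List.mem_singleton]
            tauto
          · simp only [List.mem_append, List.mem_singleton]
            tauto
        · rw [PySem.Dict.getD_modify]
          split_ifs with hax
          · subst hax
            simp only [List.mem_append, List.mem_singleton]
            tauto
          · tauto
      rw [hstep]
      have hpair1 : ([x, y] = [a, b] ↔ a = x ∧ b = y) := by
        constructor
        · intro h; injection h with h1 h2; injection h2 with h2 _; exact ⟨h1.symm, h2.symm⟩
        · rintro ⟨h1, h2⟩; rw [h1, h2]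
      have hpair2 : ([x, y] = [b, a] ↔ a = y ∧ b = x) := by
        constructor
        · intro h; injection h with h1 h2; injection h2 with h2 _; exact ⟨h2.symm, h1.symm⟩
        · rintro ⟨h1, h2⟩; rw [h1, h2]
      rw [hpair1, hpair2]
      tauto
    · rw [ih]
      have : ¬ ((x :: y :: z :: r : List Int) = [a, b] ∨ (x :: y :: z :: r : List Int) = [b, a]) := by
        rintro (h | h) <;> (have := congrArg List.length h; simp at this)
      tauto

theorem memB (l : List (List Int)) (a b : Int) :
    b ∈ (adjB l).getD a [] ↔ AdjP l a b := by
  unfold adjB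
  rw [memB_aux]
  simp [PySem.Dict.getD_empty]

theorem hrangeB (n : Int) (l : List (List Int))
    (hpre : ∀ p ∈ l, p.length = 2 ∧ ∀ v ∈ p, 0 ≤ v ∧ v < n) :
    ∀ a b : Int, b ∈ (adjB l).getD a [] → 0 ≤ b ∧ b.toNat < n.toNat := by
  intro a b h
  rw [memB] at h
  have := adjP_range n l hpre h
  omega

-- reachability transfer lemmas
theorem reach_mono {nbr : Int → List Int} {vis w : List Bool} (hm : Mono vis w) {u i : Int}
    (h : ReachN nbr w u i) : ReachN nbr vis u i :=
  Relation.ReflTransGen.mono (fun _ _ hab => ⟨hab.1, getV_false_mono hm hab.2⟩) h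

theorem reach_visited (nbr : Int → List Int) (vis fin : List Bool) (u : Int)
    (hu : getV fin u = true) (hu0 : 0 ≤ u) (huv : getV vis u = false)
    (hr : ∀ a b : Int, b ∈ nbr a → 0 ≤ b)
    (hcl : ∀ a : Int, 0 ≤ a → getV vis a = false → getV fin a = true →
      ∀ b ∈ nbr a, getV fin b = true) :
    ∀ w, ReachN nbr vis u w → getV fin w = true := by
  have key : ∀ w, ReachN nbr vis u w → getV fin w = true ∧ getV vis w = false ∧ 0 ≤ w := by
    intro w h
    induction h with
    | refl => exact ⟨hu, huv, hu0⟩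
    | tail hab hbc ih =>
      obtain ⟨hf, hv, h0⟩ := ih
      exact ⟨hcl _ h0 hv hf _ hbc.1, hbc.2, hr _ _ hbc.1⟩
  exact fun w h => (key w h).1

theorem reachA_iff_reachB (n : Int) (l : List (List Int))
    (hpre : ∀ p ∈ l, p.length = 2 ∧ ∀ v ∈ p, 0 ≤ v ∧ v < n)
    (vis : List Bool) (s : Int) (hs0 : 0 ≤ s) (w : Int) :
    ReachN (getRow (graphA n l)) vis s w ↔ ReachN (fun a => (adjB l).getD a []) vis s w := by
  constructor
  · intro h
    have key : ∀ w, ReachN (getRow (graphA n l)) vis s w →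
        0 ≤ w ∧ ReachN (fun a => (adjB l).getD a []) vis s w := by
      intro w h
      induction h with
      | refl => exact ⟨hs0, Relation.ReflTransGen.refl⟩
      | tail hab hbc ih =>
        obtain ⟨h0, hrb⟩ := ih
        have hadj : AdjP l _ _ := (memA n l hpre _ _ h0).mp hbc.1
        have hb0 := (adjP_range n l hpre hadj).2.1
        exact ⟨hb0, Relation.ReflTransGen.tail hrb ⟨(memB l _ _).mpr hadj, hbc.2⟩⟩
    exact (key w h).2
  · intro h
    have key : ∀ w, ReachN (fun a => (adjB l).getD a []) vis s w →
        0 ≤ w ∧ ReachN (getRow (graphA n l)) vis s w := by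
      intro w h
      induction h with
      | refl => exact ⟨hs0, Relation.ReflTransGen.refl⟩
      | tail hab hbc ih =>
        obtain ⟨h0, hra⟩ := ih
        have hadj : AdjP l _ _ := (memB l _ _).mp hbc.1
        have hb0 := (adjP_range n l hpre hadj).2.1
        exact ⟨hb0, Relation.ReflTransGen.tail hra ⟨(memA n l hpre _ _ h0).mpr hadj, hbc.2⟩⟩
    exact (key w h).2
def dfsAstep (g : List (List Int)) (f : Nat) : Int × List Bool → Int → Int × List Bool :=
  fun acc v => if getV acc.2 v = false then
      let r := dfsA g f v acc.2
      (acc.1 + r.1, r.2)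
    else acc

-- loop invariant for the fold inside dfsA
def PhiA (g : List (List Int)) (N : Nat) (vis : List Bool) (u : Int) (acc : Int × List Bool) : Prop :=
  acc.2.length = N ∧ Mono (setV vis u) acc.2 ∧
  (∀ i : Int, 0 ≤ i → getV acc.2 i = true → getV vis i = true ∨ ReachN (getRow g) vis u i) ∧
  (∀ a : Int, 0 ≤ a → getV vis a = false → getV acc.2 a = true →
      a = u ∨ ∀ b ∈ getRow g a, getV acc.2 b = true) ∧
  acc.1 = ((vis.count false : Int) - (acc.2.count false : Int))

theorem dfsA_fold (g : List (List Int)) (N : Nat) (f : Nat)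
    (hr : ∀ a b : Int, b ∈ getRow g a → 0 ≤ b ∧ b.toNat < N)
    (IH : ∀ (vis : List Bool) (u : Int), vis.length = N → 0 ≤ u → u.toNat < N →
        getV vis u = false → vis.count false < f →
        (dfsA g f u vis).2.length = N ∧ Mono vis (dfsA g f u vis).2 ∧
        getV (dfsA g f u vis).2 u = true ∧
        (∀ i : Int, 0 ≤ i → getV (dfsA g f u vis).2 i = true →
          getV vis i = true ∨ ReachN (getRow g) vis u i) ∧
        (∀ a : Int, 0 ≤ a → getV vis a = false → getV (dfsA g f u vis).2 a = true →
          ∀ b ∈ getRow g a, getV (dfsA g f u vis).2 b = true) ∧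
        (dfsA g f u vis).1 = ((vis.count false : Int) - ((dfsA g f u vis).2.count false : Int)))
    (vis : List Bool) (u : Int) (hv : vis.length = N) (_hu0 : 0 ≤ u) (huN : u.toNat < N)
    (huF : getV vis u = false) (hcf : vis.count false < f + 1) :
    ∀ (ns : List Int), (∀ b ∈ ns, b ∈ getRow g u) → ∀ (acc : Int × List Bool),
      PhiA g N vis u acc →
      PhiA g N vis u (ns.foldl (dfsAstep g f) acc) ∧
      Mono acc.2 (ns.foldl (dfsAstep g f) acc).2 ∧
      ∀ v ∈ ns, getV (ns.foldl (dfsAstep g f) acc).2 v = true := by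
  intro ns
  induction ns with
  | nil => intro _ acc hP; exact ⟨hP, fun _ h => h, by simp⟩
  | cons v t ih =>
    intro hsub acc hP
    obtain ⟨hlen, hmono, hsound, hclos, hcount⟩ := hP
    have hvmem : v ∈ getRow g u := hsub v (by simp)
    have hvrange := hr u v hvmem
    have hmono_vis : Mono vis acc.2 := mono_trans (mono_setV vis u) hmono
    rw [List.foldl_cons]
    by_cases hb : getV acc.2 v = false
    · have hcfacc : acc.2.count false < f := by
        have h1 := count_false_le_of_mono (setV vis u) acc.2
          (by rw [length_setV, hv, hlen]) hmono
        have h2 := count_false_setV vis u (by omega) huF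
        omega
      obtain ⟨rlen, rmono, rstart, rsound, rclos, rcount⟩ :=
        IH acc.2 v hlen hvrange.1 (by omega) hb hcfacc
      have hstep : dfsAstep g f acc v = (acc.1 + (dfsA g f v acc.2).1, (dfsA g f v acc.2).2) := by
        unfold dfsAstep; rw [if_pos hb]
      rw [hstep]
      have hP' : PhiA g N vis u (acc.1 + (dfsA g f v acc.2).1, (dfsA g f v acc.2).2) := by
        refine ⟨rlen, mono_trans hmono rmono, ?_, ?_, ?_⟩
        · intro i hi0 hit
          rcases rsound i hi0 hit with h | h
          · exact hsound i hi0 h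
          · exact Or.inr (Relation.ReflTransGen.head
              ⟨hvmem, getV_false_mono hmono_vis hb⟩ (reach_mono hmono_vis h))
        · intro a ha0 hav hat
          by_cases hacc : getV acc.2 a = true
          · rcases hclos a ha0 hav hacc with h | h
            · exact Or.inl h
            · exact Or.inr (fun b hbmem => rmono b.toNat (h b hbmem))
          · have haccf : getV acc.2 a = false := by cases h : getV acc.2 a <;> simp_all
            exact Or.inr (rclos a ha0 haccf hat)
        · simp only []
          rw [hcount, rcount]
          ring
      obtain ⟨hPf, hmonof, hallf⟩ := ih (fun b hb' => hsub b (by simp [hb'])) _ hP'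
      refine ⟨hPf, mono_trans rmono hmonof, ?_⟩
      intro w hw
      rcases List.mem_cons.mp hw with h | h
      · subst h; exact hmonof w.toNat rstart
      · exact hallf w h
    · have hbt : getV acc.2 v = true := by cases h : getV acc.2 v <;> simp_all
      have hstep : dfsAstep g f acc v = acc := by unfold dfsAstep; rw [if_neg hb]
      rw [hstep]
      obtain ⟨hPf, hmonof, hallf⟩ := ih (fun b hb' => hsub b (by simp [hb'])) acc
        ⟨hlen, hmono, hsound, hclos, hcount⟩
      refine ⟨hPf, hmonof, ?_⟩
      intro w hw
      rcases List.mem_cons.mp hw with h | h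
      · subst h; exact hmonof w.toNat hbt
      · exact hallf w h

theorem dfsA_spec (g : List (List Int)) (N : Nat)
    (hr : ∀ a b : Int, b ∈ getRow g a → 0 ≤ b ∧ b.toNat < N) :
    ∀ (f : Nat) (vis : List Bool) (u : Int), vis.length = N → 0 ≤ u → u.toNat < N →
      getV vis u = false → vis.count false < f →
      (dfsA g f u vis).2.length = N ∧ Mono vis (dfsA g f u vis).2 ∧
      getV (dfsA g f u vis).2 u = true ∧
      (∀ i : Int, 0 ≤ i → getV (dfsA g f u vis).2 i = true →
        getV vis i = true ∨ ReachN (getRow g) vis u i) ∧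
      (∀ a : Int, 0 ≤ a → getV vis a = false → getV (dfsA g f u vis).2 a = true →
        ∀ b ∈ getRow g a, getV (dfsA g f u vis).2 b = true) ∧
      (dfsA g f u vis).1 = ((vis.count false : Int) - ((dfsA g f u vis).2.count false : Int)) := by
  intro f
  induction f with
  | zero => intro vis u _ _ _ _ hcf; omega
  | succ f IHf =>
    intro vis u hv hu0 huN huF hcf
    have hP0 : PhiA g N vis u (1, setV vis u) := by
      refine ⟨by rw [length_setV, hv], fun _ h => h, ?_, ?_, ?_⟩
      · intro i hi0 hit
        rw [getV_setV vis u i (by omega)] at hit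
        split_ifs at hit with hi
        · have : i = u := by omega
          subst this; exact Or.inr Relation.ReflTransGen.refl
        · exact Or.inl hit
      · intro a ha0 hav hat
        rw [getV_setV vis u a (by omega)] at hat
        split_ifs at hat with hi
        · left; omega
        · rw [hav] at hat; exact absurd hat (by simp)
      · have := count_false_setV vis u (by omega) huF
        simp only []
        omega
    have hunf : dfsA g (f + 1) u vis = (getRow g u).foldl (dfsAstep g f) (1, setV vis u) := rfl
    obtain ⟨hPf, hmonof, hallf⟩ :=
      dfsA_fold g N f hr IHf vis u hv hu0 huN huF hcf (getRow g u) (fun _ h => h)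
        (1, setV vis u) hP0
    obtain ⟨flen, fmono, fsound, fclos, fcount⟩ := hPf
    rw [hunf]
    have hset_u : getV (setV vis u) u = true := by
      rw [getV_setV vis u u (by omega)]; simp
    refine ⟨flen, mono_trans (mono_setV vis u) fmono, hmonof u.toNat hset_u, fsound, ?_, fcount⟩
    intro a ha0 hav hat
    rcases fclos a ha0 hav hat with h | h
    · subst h; exact hallf
    · exact h
def bfsBstep : List Bool × List Int → Int → List Bool × List Int :=
  fun p v => if getV p.1 v = false then (setV p.1 v, p.2 ++ [v]) else p

-- loop invariant for the fold inside bfsB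
def PhiB (adj : PySem.Dict Int (List Int)) (N : Nat) (vis : List Bool) (s u : Int)
    (seen : List Bool) (rest : List Int) (p : List Bool × List Int) : Prop :=
  p.1.length = N ∧ Mono vis p.1 ∧
  (∀ x ∈ p.2, 0 ≤ x ∧ x.toNat < N ∧ getV p.1 x = true ∧ getV vis x = false) ∧
  (∀ i : Int, 0 ≤ i → getV p.1 i = true →
      getV vis i = true ∨ ReachN (fun a => adj.getD a []) vis s i) ∧
  (∀ a : Int, 0 ≤ a → getV vis a = false → getV p.1 a = true →
      a = u ∨ a ∈ p.2 ∨ ∀ b ∈ adj.getD a [], getV p.1 b = true) ∧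
  (∀ x ∈ rest, x ∈ p.2) ∧
  p.1.count false + p.2.length = seen.count false + rest.length

theorem bfsB_fold (adj : PySem.Dict Int (List Int)) (N : Nat)
    (hr : ∀ a b : Int, b ∈ adj.getD a [] → 0 ≤ b ∧ b.toNat < N)
    (vis : List Bool) (s u : Int)
    (hsu : ReachN (fun a => adj.getD a []) vis s u)
    (seen : List Bool) (rest : List Int) :
    ∀ (ns : List Int), (∀ b ∈ ns, b ∈ adj.getD u []) → ∀ (p : List Bool × List Int),
      PhiB adj N vis s u seen rest p →
      PhiB adj N vis s u seen rest (ns.foldl bfsBstep p) ∧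
      Mono p.1 (ns.foldl bfsBstep p).1 ∧
      ∀ v ∈ ns, getV (ns.foldl bfsBstep p).1 v = true := by
  intro ns
  induction ns with
  | nil => intro _ p hP; exact ⟨hP, fun _ h => h, by simp⟩
  | cons v t ih =>
    intro hsub p hP
    obtain ⟨hlen, hmono, hstk, hsound, hclos, hrest, hcount⟩ := hP
    have hvmem : v ∈ adj.getD u [] := hsub v (by simp)
    have hvrange := hr u v hvmem
    rw [List.foldl_cons]
    by_cases hb : getV p.1 v = false
    · have hstep : bfsBstep p v = (setV p.1 v, p.2 ++ [v]) := by
        unfold bfsBstep; rw [if_pos hb]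
      rw [hstep]
      have hvN : v.toNat < p.1.length := by omega
      have hP' : PhiB adj N vis s u seen rest (setV p.1 v, p.2 ++ [v]) := by
        refine ⟨by rw [length_setV]; exact hlen, mono_trans hmono (mono_setV p.1 v), ?_, ?_, ?_, ?_, ?_⟩
        · intro x hx
          rcases List.mem_append.mp hx with h | h
          · obtain ⟨h1, h2, h3, h4⟩ := hstk x h
            exact ⟨h1, h2, mono_setV p.1 v x.toNat h3, h4⟩
          · have hx : x = v := by simpa using h
            rw [hx]
            refine ⟨hvrange.1, by omega, ?_, getV_false_mono hmono hb⟩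
            rw [getV_setV p.1 v v hvN]; simp
        · intro i hi0 hit
          rw [getV_setV p.1 v i hvN] at hit
          split_ifs at hit with hi
          · have : i = v := by omega
            subst this
            exact Or.inr (Relation.ReflTransGen.tail hsu ⟨hvmem, getV_false_mono hmono hb⟩)
          · exact hsound i hi0 hit
        · intro a ha0 hav hat
          rw [getV_setV p.1 v a hvN] at hat
          split_ifs at hat with hi
          · have : a = v := by omega
            subst this
            exact Or.inr (Or.inl (by simp))
          · rcases hclos a ha0 hav hat with h | h | h
            · exact Or.inl h
            · exact Or.inr (Or.inl (by simp [h]))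
            · exact Or.inr (Or.inr (fun b hbmem => mono_setV p.1 v b.toNat (h b hbmem)))
        · intro x hx; simp [hrest x hx]
        · have := count_false_setV p.1 v hvN hb
          simp only [List.length_append, List.length_singleton]
          omega
      obtain ⟨hPf, hmonof, hallf⟩ := ih (fun b hb' => hsub b (by simp [hb'])) _ hP'
      refine ⟨hPf, mono_trans (mono_setV p.1 v) hmonof, ?_⟩
      intro w hw
      rcases List.mem_cons.mp hw with h | h
      · have hvv : getV (setV p.1 v) v = true := by rw [getV_setV p.1 v v hvN]; simp
        rw [h]
        exact hmonof v.toNat hvv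
      · exact hallf w h
    · have hbt : getV p.1 v = true := by cases h : getV p.1 v <;> simp_all
      have hstep : bfsBstep p v = p := by unfold bfsBstep; rw [if_neg hb]
      rw [hstep]
      obtain ⟨hPf, hmonof, hallf⟩ := ih (fun b hb' => hsub b (by simp [hb'])) p
        ⟨hlen, hmono, hstk, hsound, hclos, hrest, hcount⟩
      refine ⟨hPf, hmonof, ?_⟩
      intro w hw
      rcases List.mem_cons.mp hw with h | h
      · subst h; exact hmonof w.toNat hbt
      · exact hallf w h

theorem bfsB_spec (adj : PySem.Dict Int (List Int)) (N : Nat)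
    (hr : ∀ a b : Int, b ∈ adj.getD a [] → 0 ≤ b ∧ b.toNat < N)
    (vis : List Bool) (s : Int) :
    ∀ (f : Nat) (stack : List Int) (size : Int) (seen : List Bool),
      seen.length = N → Mono vis seen →
      (∀ x ∈ stack, 0 ≤ x ∧ x.toNat < N ∧ getV seen x = true ∧ getV vis x = false) →
      (∀ i : Int, 0 ≤ i → getV seen i = true →
        getV vis i = true ∨ ReachN (fun a => adj.getD a []) vis s i) →
      (∀ a : Int, 0 ≤ a → getV vis a = false → getV seen a = true →
        a ∈ stack ∨ ∀ b ∈ adj.getD a [], getV seen b = true) →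
      size = ((vis.count false : Int) - (seen.count false : Int) - (stack.length : Int)) →
      seen.count false + stack.length < f →
      (bfsB adj f stack size seen).2.length = N ∧
      Mono seen (bfsB adj f stack size seen).2 ∧
      (∀ i : Int, 0 ≤ i → getV (bfsB adj f stack size seen).2 i = true →
        getV vis i = true ∨ ReachN (fun a => adj.getD a []) vis s i) ∧
      (∀ a : Int, 0 ≤ a → getV vis a = false → getV (bfsB adj f stack size seen).2 a = true →
        ∀ b ∈ adj.getD a [], getV (bfsB adj f stack size seen).2 b = true) ∧
      (bfsB adj f stack size seen).1 =
        ((vis.count false : Int) - ((bfsB adj f stack size seen).2.count false : Int)) := by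
  intro f
  induction f with
  | zero => intro stack size seen _ _ _ _ _ _ hf; omega
  | succ f IHf =>
    intro stack size seen hlen hmono hstk hsound hclos hsize hf
    cases hlast : stack.getLast? with
    | none =>
      have hnil : stack = [] := List.getLast?_eq_none_iff.mp hlast
      subst hnil
      have hunf : bfsB adj (f + 1) [] size seen = (size, seen) := rfl
      rw [hunf]
      refine ⟨hlen, fun _ h => h, hsound, ?_, ?_⟩
      · intro a ha0 hav hat
        rcases hclos a ha0 hav hat with h | h
        · simp at h
        · exact h
      · simp at hsize; omega
    | some u =>
      obtain ⟨l', hl'⟩ := List.getLast?_eq_some_iff.mp hlast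
      have hdrop : stack.dropLast = l' := by rw [hl']; simp
      have humem : u ∈ stack := by rw [hl']; simp
      obtain ⟨hu0, huN, husT, huvF⟩ := hstk u humem
      have hsu : ReachN (fun a => adj.getD a []) vis s u := by
        rcases hsound u hu0 husT with h | h
        · rw [h] at huvF; exact absurd huvF (by simp)
        · exact h
      have hunf : bfsB adj (f + 1) stack size seen =
          bfsB adj f ((adj.getD u []).foldl bfsBstep (seen, stack.dropLast)).2 (size + 1)
            ((adj.getD u []).foldl bfsBstep (seen, stack.dropLast)).1 := by
        conv_lhs => rw [show bfsB adj (f + 1) stack size seen =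
          (match stack.getLast? with
           | none => (size, seen)
           | some u =>
             let st := (adj.getD u []).foldl bfsBstep (seen, stack.dropLast)
             bfsB adj f st.2 (size + 1) st.1) from rfl]
        rw [hlast]
      rw [hunf, hdrop]
      have hP0 : PhiB adj N vis s u seen l' (seen, l') := by
        refine ⟨hlen, hmono, ?_, hsound, ?_, fun x hx => hx, rfl⟩
        · intro x hx; exact hstk x (by rw [hl']; simp [hx])
        · intro a ha0 hav hat
          rcases hclos a ha0 hav hat with h | h
          · rw [hl'] at h
            rcases List.mem_append.mp h with h | h
            · exact Or.inr (Or.inl h)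
            · exact Or.inl (by simpa using h)
          · exact Or.inr (Or.inr h)
      obtain ⟨hPf, hmonof, hallf⟩ :=
        bfsB_fold adj N hr vis s u hsu seen l' (adj.getD u []) (fun _ h => h) (seen, l') hP0
      obtain ⟨flen, fmono, fstk, fsound, fclos, _, fcount⟩ := hPf
      have hstacklen : stack.length = l'.length + 1 := by rw [hl']; simp
      have hIH := IHf ((adj.getD u []).foldl bfsBstep (seen, l')).2 (size + 1)
        ((adj.getD u []).foldl bfsBstep (seen, l')).1 flen fmono fstk fsound
        (by
          intro a ha0 hav hat
          rcases fclos a ha0 hav hat with h | h | h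
          · subst h; exact Or.inr hallf
          · exact Or.inl h
          · exact Or.inr h)
        (by omega)
        (by omega)
      obtain ⟨glen, gmono, gsound, gclos, gcount⟩ := hIH
      exact ⟨glen, mono_trans hmonof gmono, gsound, gclos, gcount⟩
theorem step_eq (n : Int) (l : List (List Int))
    (hpre : ∀ p ∈ l, p.length = 2 ∧ ∀ v ∈ p, 0 ≤ v ∧ v < n)
    (vis : List Bool) (hv : vis.length = n.toNat) (s : Int) (hs0 : 0 ≤ s) (hsn : s < n)
    (hsf : getV vis s = false) :
    dfsA (graphA n l) (vis.count false + 1) s vis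
      = bfsB (adjB l) (vis.count false + 1) [s] 0 (setV vis s) := by
  have hsN : s.toNat < n.toNat := by omega
  have hrA := hrangeA n l hpre
  have hrB := hrangeB n l hpre
  obtain ⟨alen, amono, astart, asound, aclos, acount⟩ :=
    dfsA_spec (graphA n l) n.toNat hrA (vis.count false + 1) vis s hv hs0 hsN hsf (by omega)
  have hseen0len : (setV vis s).length = n.toNat := by rw [length_setV, hv]
  have hcfs := count_false_setV vis s (by omega) hsf
  obtain ⟨blen, bmono, bsound, bclos, bcount⟩ :=
    bfsB_spec (adjB l) n.toNat hrB vis s (vis.count false + 1) [s] 0 (setV vis s)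
      hseen0len (mono_setV vis s)
      (by
        intro x hx
        have hx' : x = s := by simpa using hx
        rw [hx']
        refine ⟨hs0, by omega, ?_, hsf⟩
        rw [getV_setV vis s s (by omega)]; simp)
      (by
        intro i hi0 hit
        rw [getV_setV vis s i (by omega)] at hit
        split_ifs at hit with hi
        · have : i = s := by omega
          subst this; exact Or.inr Relation.ReflTransGen.refl
        · exact Or.inl hit)
      (by
        intro a ha0 hav hat
        rw [getV_setV vis s a (by omega)] at hat
        split_ifs at hat with hi
        · left; simp; omega
        · rw [hav] at hat; exact absurd hat (by simp))
      (by simp only [List.length_cons, List.length_nil]; push_cast; omega)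
      (by simp only [List.length_cons, List.length_nil]; omega)
  set fA := (dfsA (graphA n l) (vis.count false + 1) s vis).2 with hfA
  set fB := (bfsB (adjB l) (vis.count false + 1) [s] 0 (setV vis s)).2 with hfB
  have hmono_vis_fB : Mono vis fB := mono_trans (mono_setV vis s) bmono
  have hBstart : getV fB s = true := by
    have : getV (setV vis s) s = true := by rw [getV_setV vis s s (by omega)]; simp
    exact bmono s.toNat this
  have compA := reach_visited (getRow (graphA n l)) vis fA s astart hs0 hsf
    (fun a b h => (hrA a b h).1) aclos
  have compB := reach_visited (fun a => (adjB l).getD a []) vis fB s hBstart hs0 hsf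
    (fun a b h => (hrB a b h).1) bclos
  have hsnd : fA = fB := by
    apply list_eq_of_getD _ _ (by rw [alen, blen])
    intro j
    have hAiff : (fA.getD j false = true ↔
        getV vis (j : Int) = true ∨ ReachN (getRow (graphA n l)) vis s (j : Int)) := by
      constructor
      · intro h; exact asound (j : Int) (by positivity) h
      · intro h
        rcases h with h | h
        · exact amono j h
        · exact compA _ h
    have hBiff : (fB.getD j false = true ↔
        getV vis (j : Int) = true ∨ ReachN (fun a => (adjB l).getD a []) vis s (j : Int)) := by
      constructor
      · intro h; exact bsound (j : Int) (by positivity) h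
      · intro h
        rcases h with h | h
        · exact hmono_vis_fB j h
        · exact compB _ h
    have hRiff := reachA_iff_reachB n l hpre vis s hs0 (j : Int)
    cases hA : fA.getD j false <;> cases hB : fB.getD j false
    · rfl
    · exfalso
      have := hAiff.mpr (by rw [← hRiff] at hBiff; exact hBiff.mp hB)
      simp_all
    · exfalso
      have := hBiff.mpr (by rw [hRiff] at hAiff; exact hAiff.mp hA)
      simp_all
    · rfl
  apply Prod.ext_iff.mpr
  constructor
  · rw [acount, bcount, hsnd]
  · exact hsnd

theorem fold_eq (n : Int) (l : List (List Int))
    (hpre : ∀ p ∈ l, p.length = 2 ∧ ∀ v ∈ p, 0 ≤ v ∧ v < n) :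
    ∀ (rng : List Int), (∀ s ∈ rng, 0 ≤ s ∧ s < n) → ∀ (acc : Int × List Bool),
      acc.2.length = n.toNat →
      rng.foldl (fun acc v => if getV acc.2 v = false then
          let d := dfsA (graphA n l) (acc.2.count false + 1) v acc.2
          (acc.1 - PySem.Int.floordiv (d.1 * (d.1 - 1)) 2, d.2)
        else acc) acc
      = rng.foldl (fun acc s => if getV acc.2 s then acc else
          let r := bfsB (adjB l) (acc.2.count false + 1) [s] 0 (setV acc.2 s)
          (acc.1 - PySem.Int.floordiv (r.1 * (r.1 - 1)) 2, r.2)) acc := by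
  intro rng
  induction rng with
  | nil => intros; rfl
  | cons s t ih =>
    intro hrng acc hlen
    obtain ⟨hs0, hsn⟩ := hrng s (by simp)
    rw [List.foldl_cons, List.foldl_cons]
    by_cases hb : getV acc.2 s = false
    · rw [if_pos hb, if_neg (by simp [hb])]
      have hstep := step_eq n l hpre acc.2 hlen s hs0 hsn hb
      have hAlen : (dfsA (graphA n l) (acc.2.count false + 1) s acc.2).2.length = n.toNat :=
        (dfsA_spec (graphA n l) n.toNat (hrangeA n l hpre) (acc.2.count false + 1) acc.2 s hlen
          hs0 (by omega) hb (by omega)).1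
      simp only [hstep] at hAlen ⊢
      exact ih (fun x hx => hrng x (by simp [hx])) _ hAlen
    · have hbt : getV acc.2 s = true := by cases h : getV acc.2 s <;> simp_all
      rw [if_neg hb, if_pos hbt]
      exact ih (fun x hx => hrng x (by simp [hx])) acc hlen
theorem journeyToMoon_eq (n : Int) (astronaut : List (List Int))
    (hpre : ∀ p ∈ astronaut, p.length = 2 ∧ ∀ v ∈ p, 0 ≤ v ∧ v < n) :
    journeyToMoon n astronaut = journeyToMoon_alt n astronaut := by
  have hA : journeyToMoon n astronaut = ((PySem.List.pyRange 0 n 1).foldl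
      (fun acc v => if getV acc.2 v = false then
          let d := dfsA (graphA n astronaut) (acc.2.count false + 1) v acc.2
          (acc.1 - PySem.Int.floordiv (d.1 * (d.1 - 1)) 2, d.2)
        else acc)
      (PySem.Int.floordiv (n * (n - 1)) 2, List.replicate n.toNat false)).1 := rfl
  have hB : journeyToMoon_alt n astronaut = ((PySem.List.pyRange 0 n 1).foldl
      (fun acc s => if getV acc.2 s then acc else
          let r := bfsB (adjB astronaut) (acc.2.count false + 1) [s] 0 (setV acc.2 s)
          (acc.1 - PySem.Int.floordiv (r.1 * (r.1 - 1)) 2, r.2))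
      (PySem.Int.floordiv (n * (n - 1)) 2, List.replicate n.toNat false)).1 := rfl
  rw [hA, hB, fold_eq n astronaut hpre (PySem.List.pyRange 0 n 1)
    (fun s hs => ⟨(PySem.List.mem_pyRange_one.mp hs).1, (PySem.List.mem_pyRange_one.mp hs).2⟩)
    (PySem.Int.floordiv (n * (n - 1)) 2, List.replicate n.toNat false)
    (by simp)]

-- ===== VERDICT (by name: the statement is the Claim_ definition above) =====
theorem journeyToMoon_spec : Claim_equal_journeyToMoon := by
  intro n astronaut _ hpre
  unfold Pre_journeyToMoon at hpre
  unfold Spec_journeyToMoon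
  exact journeyToMoon_eq n astronaut hpre
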